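-- pv_equiv track=rewrite | github.com/MHale123/ProtMerge | human_protein_analyzer.py | _calculate_reliability_score
-- ===== SOURCE A (Python) =====
-- def _calculate_reliability_score(antibody_info):
--     """Convert antibody reliability information to numerical score (0-5)"""
--     try:
--         if not antibody_info:
--             return 3  # Default medium
--
--         # Convert reliability terms to scores
--         reliability_text = " ".join(str(info).lower() for info in antibody_info)
--
--         if any(term in reliability_text for term in ['high', 'excellent', 'validated']):
--             return 5
--         elif any(term in reliability_text for term in ['good', 'reliable']):
--             return 4
--         elif any(term in reliability_text for term in ['medium', 'moderate']):
--             return 3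
--         elif any(term in reliability_text for term in ['low', 'poor']):
--             return 2
--         elif any(term in reliability_text for term in ['unknown', 'uncertain']):
--             return 1
--         else:
--             return 3  # Default medium
--
--     except Exception:
--         return 3  # Default medium
-- ===== SOURCE B (Python) =====
-- _TIER = {'high': 5, 'excellent': 5, 'validated': 5,
--          'good': 4, 'reliable': 4,
--          'medium': 3, 'moderate': 3,
--          'low': 2, 'poor': 2,
--          'unknown': 1, 'uncertain': 1}
--
-- def _calculate_reliability_score(antibody_info):
--     """Convert antibody reliability information to numerical score (0-5)"""
--     if not antibody_info:
--         return 3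
--     text = " ".join(str(info).lower() for info in antibody_info)
--     return max((score for kw, score in _TIER.items() if kw in text), default=3)
-- ===== Notes on version B (the rewrite author's own statement) =====
-- stated objective: simpler
-- what changed: Replaces the five-branch elif priority chain by a single keyword->score table scanned once, returning the maximum matching score (default 3); correct because the chain's priority order coincides with descending scores.
import Mathlib
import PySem

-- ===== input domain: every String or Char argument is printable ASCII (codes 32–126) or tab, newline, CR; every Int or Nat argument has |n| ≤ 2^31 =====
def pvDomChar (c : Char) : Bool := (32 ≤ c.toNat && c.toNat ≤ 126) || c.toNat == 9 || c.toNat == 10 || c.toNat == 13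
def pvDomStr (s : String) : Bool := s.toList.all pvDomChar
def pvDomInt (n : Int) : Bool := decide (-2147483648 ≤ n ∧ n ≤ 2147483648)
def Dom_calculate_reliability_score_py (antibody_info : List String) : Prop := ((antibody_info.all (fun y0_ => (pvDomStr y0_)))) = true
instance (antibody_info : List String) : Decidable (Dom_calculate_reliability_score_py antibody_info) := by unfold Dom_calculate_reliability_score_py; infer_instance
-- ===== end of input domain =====

-- B replaces A's five-branch elif priority chain by one keyword→score table scanned once
-- with a max-aggregation (objective: simpler); return value only, no side effects involved.

-- ===== PORT A =====
def calculate_reliability_score_py (antibody_info : List String) : Int :=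
  if antibody_info.isEmpty then 3
  else
    let reliability_text := PySem.Str.join " " (antibody_info.map (fun info => PySem.Str.lower info))
    if ["high", "excellent", "validated"].any (fun term => PySem.Str.isIn term reliability_text) then 5
    else if ["good", "reliable"].any (fun term => PySem.Str.isIn term reliability_text) then 4
    else if ["medium", "moderate"].any (fun term => PySem.Str.isIn term reliability_text) then 3
    else if ["low", "poor"].any (fun term => PySem.Str.isIn term reliability_text) then 2
    else if ["unknown", "uncertain"].any (fun term => PySem.Str.isIn term reliability_text) then 1
    else 3

-- ===== PORT B =====
def tierTable : List (String × Int) :=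
  [("high", 5), ("excellent", 5), ("validated", 5),
   ("good", 4), ("reliable", 4),
   ("medium", 3), ("moderate", 3),
   ("low", 2), ("poor", 2),
   ("unknown", 1), ("uncertain", 1)]

-- Python's max(xs, default=d): d on the empty list, else the maximum.
def pyMaxD (default : Int) : List Int → Int
  | [] => default
  | x :: rest => rest.foldl max x

def calculate_reliability_score_py_alt (antibody_info : List String) : Int :=
  if antibody_info.isEmpty then 3
  else
    let text := PySem.Str.join " " (antibody_info.map (fun info => PySem.Str.lower info))
    pyMaxD 3 ((tierTable.filter (fun p => PySem.Str.isIn p.1 text)).map Prod.snd)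

-- ===== PRECONDITION & SPEC =====
def Spec_calculate_reliability_score_py (antibody_info : List String) (out : Int) : Prop := out = calculate_reliability_score_py_alt antibody_info
instance (antibody_info : List String) (out : Int) : Decidable (Spec_calculate_reliability_score_py antibody_info out) := by unfold Spec_calculate_reliability_score_py; infer_instance

-- ===== CLAIM (what is proved, stated in full; the proofs are below) =====
def Claim_equal_calculate_reliability_score_py : Prop := ∀ (antibody_info : List String), Dom_calculate_reliability_score_py antibody_info → Spec_calculate_reliability_score_py antibody_info (calculate_reliability_score_py antibody_info)

-- ===== LEMMAS AND PROOFS =====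

-- filter over a cons, phrased as an append (avoids duplicating the tail in both ite branches)
theorem pv_filter_cons_append {α : Type} (p : α → Bool) (a : α) (l : List α) :
    List.filter p (a :: l) = (if p a = true then [a] else []) ++ List.filter p l := by
  by_cases h : p a = true <;> simp [h]

-- The elif chain's priority order coincides with descending table scores, so it equals the
-- max (default 3) over the matching table entries: a fact about 11 booleans, by decide.
theorem pv_core (b1 b2 b3 b4 b5 b6 b7 b8 b9 b10 b11 : Bool) :
    (if (b1 || (b2 || (b3 || false))) = true then (5 : Int)
     else if (b4 || (b5 || false)) = true then 4
     else if (b6 || (b7 || false)) = true then 3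
     else if (b8 || (b9 || false)) = true then 2
     else if (b10 || (b11 || false)) = true then 1
     else 3)
    = pyMaxD 3 (List.map Prod.snd
        ((if b1 = true then [(("high" : String), (5 : Int))] else []) ++
         ((if b2 = true then [("excellent", 5)] else []) ++
          ((if b3 = true then [("validated", 5)] else []) ++
           ((if b4 = true then [("good", 4)] else []) ++
            ((if b5 = true then [("reliable", 4)] else []) ++
             ((if b6 = true then [("medium", 3)] else []) ++
              ((if b7 = true then [("moderate", 3)] else []) ++
               ((if b8 = true then [("low", 2)] else []) ++
                ((if b9 = true then [("poor", 2)] else []) ++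
                 ((if b10 = true then [("unknown", 1)] else []) ++
                  (if b11 = true then [("uncertain", 1)] else [])))))))))))) := by
  revert b1 b2 b3 b4 b5 b6 b7 b8 b9 b10 b11
  decide

theorem pv_key (text : String) :
    (if ["high", "excellent", "validated"].any (fun term => PySem.Str.isIn term text) then (5 : Int)
     else if ["good", "reliable"].any (fun term => PySem.Str.isIn term text) then 4
     else if ["medium", "moderate"].any (fun term => PySem.Str.isIn term text) then 3
     else if ["low", "poor"].any (fun term => PySem.Str.isIn term text) then 2
     else if ["unknown", "uncertain"].any (fun term => PySem.Str.isIn term text) then 1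
     else 3)
    = pyMaxD 3 ((tierTable.filter (fun p => PySem.Str.isIn p.1 text)).map Prod.snd) := by
  simp only [tierTable, List.any_cons, List.any_nil, pv_filter_cons_append, List.filter_nil,
    List.append_nil]
  exact pv_core _ _ _ _ _ _ _ _ _ _ _

-- ===== VERDICT (by name: the statement is the Claim_ definition above) =====
theorem calculate_reliability_score_py_spec : Claim_equal_calculate_reliability_score_py := by
  intro antibody_info _
  unfold Spec_calculate_reliability_score_py calculate_reliability_score_py calculate_reliability_score_py_alt
  by_cases h : antibody_info.isEmpty
  · simp [h]
  · simp only [h, Bool.false_eq_true, if_false]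
    exact pv_key _
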